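-- pv_equiv track=rewrite | github.com/Al-tekreeti/dataStructures_and_algorithms | meta.py | minOperations2
-- ===== SOURCE A (Python) =====
-- def reverse_list(lst):
--   new_lst = []
--   for elem in reversed(lst):
--     new_lst.append(elem)
--   return new_lst
--
-- def minOperations2(arr):
--   # Not optimal
--   count = 0
--   ind1, ind2 = -1, -1
--   i = 0
--   while i < len(arr):
--     if ind1 == -1 and arr[i] != i + 1:
--       ind1 = i
--     if ind1 != -1 and arr[i] == ind1 + 1:
--       ind2 = i
--     if ind1 != -1 and ind2 != -1:
--       count += 1
--       arr[:] = arr[:ind1] + reverse_list(arr[ind1:ind2 + 1]) + arr[ind2 + 1:]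
--       i = ind1
--       ind1, ind2 = -1, -1
--
--     i += 1
--
--   return count
-- ===== SOURCE B (Python) =====
-- def minOperations2(arr):
--     # Linked-chain simulation: nodes are original positions, neighbour slots are
--     # undirected, so each greedy reversal is a constant-size two-pointer splice
--     # rather than a list rebuild.  Does not mutate arr.
--     n = len(arr)
--     n1 = [k - 1 for k in range(n)]                 # -1 means "no neighbour"
--     n2 = [k + 1 if k + 1 < n else -1 for k in range(n)]
--
--     def other(u, p):                               # the neighbour of u that is not p
--         return n2[u] if n1[u] == p else n1[u]
--
--     def replace(u, old, new):                      # rewire one slot of u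
--         if n1[u] == old:
--             n1[u] = new
--         else:
--             n2[u] = new
--
--     head = 0 if n else -1
--     prev = -1                                      # node we arrived at head from
--     v = 1                                          # value the head should carry
--     count = 0
--     while head != -1:
--         if arr[head] == v:                         # head in place: pop it
--             head, prev, v = other(head, prev), head, v + 1
--             continue
--         pred, cur = prev, head                     # walk right for the first v
--         while cur != -1 and arr[cur] != v:
--             pred, cur = cur, other(cur, pred)
--         if cur == -1:
--             return count                           # v absent: the greedy stops
--         count += 1                                 # reverse head..cur, pop cur:
--         succ = other(cur, pred)                    # splice cur out of the chain,
--         replace(head, prev, succ)                  # link old head to cur's successor;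
--         if succ != -1:
--             replace(succ, cur, head)
--         head, prev, v = pred, cur, v + 1           # new head = cur's predecessor
--     return count
-- ===== Notes on version B (the rewrite author's own statement) =====
-- stated objective: alternative
-- what changed: Replaced A's array state machine (sentinel indices ind1/ind2, index reset, whole-list rebuild per reversal) by a linked-chain simulation over original positions with undirected neighbour slots, where each greedy reversal is a constant-size two-pointer splice (interior adjacencies are direction-agnostic) and only the mismatch walk scans; B does not mutate its argument while A rewrites it in place.
import Mathlib
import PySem

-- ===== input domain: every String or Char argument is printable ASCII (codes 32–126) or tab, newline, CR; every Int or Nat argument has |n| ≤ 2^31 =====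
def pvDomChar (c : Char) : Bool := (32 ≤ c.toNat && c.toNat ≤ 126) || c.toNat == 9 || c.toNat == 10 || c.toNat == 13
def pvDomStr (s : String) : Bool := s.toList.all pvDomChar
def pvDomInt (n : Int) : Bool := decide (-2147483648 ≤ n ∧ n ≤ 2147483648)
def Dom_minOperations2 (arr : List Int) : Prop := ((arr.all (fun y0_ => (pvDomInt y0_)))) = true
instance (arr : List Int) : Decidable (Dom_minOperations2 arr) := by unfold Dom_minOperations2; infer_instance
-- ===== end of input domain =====

-- B simulates the same greedy on a linked chain of original positions with undirected neighbour
-- slots, so each reversal is a constant-size two-pointer splice rather than A's whole-list rebuild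
-- (alternative data structure, not measured faster); the equivalence proved is about the RETURN
-- value only: Python A mutates its argument in place, B does not.

-- ===== PORT A =====
-- reverse_list: append elements of reversed(lst) one by one
def pvRevList (lst : List Int) : List Int :=
  lst.reverse.foldl (fun acc x => acc ++ [x]) []

-- 'if ind1 == -1 and arr[i] != i + 1: ind1 = i'
def pvUpd1 (arr : List Int) (ind1 i : Int) : Int :=
  if ind1 = -1 ∧ PySem.List.pyGetD arr i 0 ≠ i + 1 then i else ind1

-- 'if ind1 != -1 and arr[i] == ind1 + 1: ind2 = i'
def pvUpd2 (arr : List Int) (ind1' ind2 i : Int) : Int :=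
  if ind1' ≠ -1 ∧ PySem.List.pyGetD arr i 0 = ind1' + 1 then i else ind2

-- 'arr[:] = arr[:ind1] + reverse_list(arr[ind1:ind2 + 1]) + arr[ind2 + 1:]'
def pvArrUpd (arr : List Int) (a b : Int) : List Int :=
  PySem.List.slice arr none (some a) ++ pvRevList (PySem.List.slice arr (some a) (some (b + 1))) ++
    PySem.List.slice arr (some (b + 1)) none

-- the while loop of A; fuel is only a totality guard (the initial fuel below is proved
-- sufficient in pvBridgeA: the loop makes fewer than (n+1)*(n+3) iterations)
def pvLoopA (arr : List Int) (count ind1 ind2 i : Int) (fuel : Nat) : Int :=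
  match fuel with
  | 0 => count
  | fuel + 1 =>
    if i < (arr.length : Int) then
      if pvUpd1 arr ind1 i ≠ -1 ∧ pvUpd2 arr (pvUpd1 arr ind1 i) ind2 i ≠ -1 then
        pvLoopA (pvArrUpd arr (pvUpd1 arr ind1 i) (pvUpd2 arr (pvUpd1 arr ind1 i) ind2 i))
          (count + 1) (-1) (-1) (pvUpd1 arr ind1 i + 1) fuel
      else
        pvLoopA arr count (pvUpd1 arr ind1 i) (pvUpd2 arr (pvUpd1 arr ind1 i) ind2 i) (i + 1) fuel
    else count

def minOperations2 (arr : List Int) : Int :=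
  pvLoopA arr 0 (-1) (-1) 0 ((arr.length + 1) * (arr.length + 3))

-- ===== PORT B =====
-- 'return n2[u] if n1[u] == p else n1[u]' — the neighbour of u that is not p
def pvOther (n1 n2 : List Int) (u p : Int) : Int :=
  if PySem.List.pyGetD n1 u 0 = p then PySem.List.pyGetD n2 u 0 else PySem.List.pyGetD n1 u 0

-- 'if n1[u] == old: n1[u] = new else: n2[u] = new' — returns the updated pair of slot arrays
def pvReplace (n1 n2 : List Int) (u old new : Int) : List Int × List Int :=
  if PySem.List.pyGetD n1 u 0 = old then (PySem.List.pySetD n1 u new, n2)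
  else (n1, PySem.List.pySetD n2 u new)

-- the inner 'while cur != -1 and arr[cur] != v' walk; fuel is only a totality guard
-- (the walk visits each chain node at most once, so arr.length + 1 steps suffice)
def pvWalk (arr n1 n2 : List Int) (v pred cur : Int) (fuel : Nat) : Int × Int :=
  match fuel with
  | 0 => (pred, cur)
  | fuel + 1 =>
    if cur ≠ -1 ∧ PySem.List.pyGetD arr cur 0 ≠ v then
      pvWalk arr n1 n2 v cur (pvOther n1 n2 cur pred) fuel
    else (pred, cur)

-- the outer 'while head != -1' loop of Source B; each iteration pops one node or returns,
-- so arr.length + 1 fuel suffices (proved in the simulation lemma pvSim below)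
def pvLoopC (arr n1 n2 : List Int) (head prev v count : Int) (fuel : Nat) : Int :=
  match fuel with
  | 0 => count
  | fuel + 1 =>
    if head = -1 then count
    else if PySem.List.pyGetD arr head 0 = v then
      pvLoopC arr n1 n2 (pvOther n1 n2 head prev) head (v + 1) count fuel
    else
      match pvWalk arr n1 n2 v prev head (arr.length + 1) with
      | (pred, cur) =>
        if cur = -1 then count
        else
          let succ := pvOther n1 n2 cur pred
          let r1 := pvReplace n1 n2 head prev succ
          let r2 := if succ = -1 then r1 else pvReplace r1.1 r1.2 succ cur head
          pvLoopC arr r2.1 r2.2 pred cur (v + 1) (count + 1) fuel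

def minOperations2_alt (arr : List Int) : Int :=
  pvLoopC arr
    ((List.range arr.length).map (fun k : Nat => (k : Int) - 1))
    ((List.range arr.length).map (fun k => if k + 1 < arr.length then (k : Int) + 1 else -1))
    (if arr.length ≠ 0 then 0 else -1) (-1) 1 0 (arr.length + 1)

-- ===== PRECONDITION & SPEC =====
def Spec_minOperations2 (arr : List Int) (out : Int) : Prop := out = minOperations2_alt arr
instance (arr : List Int) (out : Int) : Decidable (Spec_minOperations2 arr out) := by unfold Spec_minOperations2; infer_instance

-- ===== CLAIM (what is proved, stated in full; the proofs are below) =====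
def Claim_equal_minOperations2 : Prop := ∀ (arr : List Int), Dom_minOperations2 arr → Spec_minOperations2 arr (minOperations2 arr)

-- ===== LEMMAS AND PROOFS =====

theorem pvRevList_eq (lst : List Int) : pvRevList lst = lst.reverse := by
  unfold pvRevList
  generalize lst.reverse = l
  suffices h : ∀ (l acc : List Int), l.foldl (fun acc x => acc ++ [x]) acc = acc ++ l by
    simpa using h l []
  intro l
  induction l with
  | nil => simp [List.foldl]
  | cons x xs ih => intro acc; simp [List.foldl, ih]

theorem pvArrUpd_length (arr : List Int) (a b : Int) (h0 : 0 ≤ a) (hab : a ≤ b)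
    (hb : b < (arr.length : Int)) : (pvArrUpd arr a b).length = arr.length := by
  unfold pvArrUpd
  rw [pvRevList_eq, PySem.List.slice_to arr (by omega : (0:Int) ≤ a),
    PySem.List.slice_from arr (by omega : (0:Int) ≤ b + 1),
    PySem.List.slice_toNat arr (by omega) (by omega)]
  simp only [List.length_append, List.length_take, List.length_reverse, List.length_drop]
  omega

theorem pvUpd1_cases (arr : List Int) (ind1 i : Int) :
    pvUpd1 arr ind1 i = i ∨ pvUpd1 arr ind1 i = ind1 := by
  unfold pvUpd1; split_ifs <;> simp

theorem pvUpd1_of_ne (arr : List Int) (ind1 i : Int) (h : ind1 ≠ -1) :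
    pvUpd1 arr ind1 i = ind1 := by
  unfold pvUpd1; rw [if_neg (fun hh => h hh.1)]

theorem pvIdx_lt {a : List Int} {v : Int} {t : Nat} (h : PySem.List.index? a v = some t) :
    t < a.length := by
  obtain ⟨ht, _, _⟩ := PySem.List.getElem_of_index?_eq_some h
  exact ht

-- the while loop of A; hinv is a totality guard (the loop invariant) used only for termination:
-- i nonnegative, ind2 cleared at loop top, ind1 either -1 or a position ≤ i
def pvLoopW (arr : List Int) (count ind1 ind2 i : Int)
    (hinv : 0 ≤ i ∧ ind2 = -1 ∧ (ind1 = -1 ∨ (0 ≤ ind1 ∧ ind1 ≤ i))) : Int :=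
  if hlt : i < (arr.length : Int) then
    if hrev : pvUpd1 arr ind1 i ≠ -1 ∧ pvUpd2 arr (pvUpd1 arr ind1 i) ind2 i ≠ -1 then
      pvLoopW (pvArrUpd arr (pvUpd1 arr ind1 i) (pvUpd2 arr (pvUpd1 arr ind1 i) ind2 i))
        (count + 1) (-1) (-1) (pvUpd1 arr ind1 i + 1)
        (by
          refine ⟨?_, rfl, Or.inl rfl⟩
          rcases pvUpd1_cases arr ind1 i with h | h <;> rcases hinv.2.2 with h1 | h1 <;> omega)
    else
      pvLoopW arr count (pvUpd1 arr ind1 i) (pvUpd2 arr (pvUpd1 arr ind1 i) ind2 i) (i + 1)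
        (by
          obtain ⟨hi, h2, h1⟩ := hinv
          refine ⟨by omega, ?_, ?_⟩
          · unfold pvUpd2
            split_ifs with h
            · exact absurd ⟨h.1, by unfold pvUpd2; rw [if_pos h]; omega⟩ hrev
            · exact h2
          · rcases pvUpd1_cases arr ind1 i with h | h <;> rcases h1 with h1 | h1 <;> omega)
  else count
termination_by
  ((((arr.length : Int) + 1 - (if ind1 = -1 then i else ind1)).toNat),
    (((arr.length : Int) + 1 - i).toNat))
decreasing_by
  · -- reversal call: segment [ind1', ind2'] with 0 ≤ ind1' ≤ ind2' = i < n keeps the length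
    obtain ⟨hi, h2, h1⟩ := hinv
    obtain ⟨hr1, hr2⟩ := hrev
    have hind2' : pvUpd2 arr (pvUpd1 arr ind1 i) ind2 i = i := by
      unfold pvUpd2 at hr2 ⊢
      split_ifs with h
      · rfl
      · rw [if_neg h] at hr2; exact absurd h2 hr2
    have hind1' : 0 ≤ pvUpd1 arr ind1 i ∧ pvUpd1 arr ind1 i ≤ i := by
      rcases pvUpd1_cases arr ind1 i with h | h <;> rcases h1 with h1 | h1 <;> omega
    have hK : (if ind1 = -1 then i else ind1) = pvUpd1 arr ind1 i := by
      by_cases h1' : ind1 = -1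
      · rw [if_pos h1']
        rcases pvUpd1_cases arr ind1 i with h | h
        · omega
        · rw [h, h1'] at hr1; exact absurd rfl hr1
      · rw [if_neg h1', pvUpd1_of_ne arr ind1 i h1']
    have hlen := pvArrUpd_length arr (pvUpd1 arr ind1 i)
      (pvUpd2 arr (pvUpd1 arr ind1 i) ind2 i) (by omega) (by omega) (by omega)
    rw [hlen, hK]
    exact Prod.Lex.left _ _ (by split_ifs <;> omega)
  · -- plain step: i increases; the first measure component does not increase
    obtain ⟨hi, _h2, h1⟩ := hinv
    rcases pvUpd1_cases arr ind1 i with h | h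
    · -- ind1 was set to i this step (or already was i)
      by_cases h1' : ind1 = -1
      · rw [if_neg (by omega), if_pos h1', h]
        exact Prod.Lex.right _ (by omega)
      · rw [if_neg h1'] at *
        by_cases hii : ind1 = i
        · rw [if_neg (by omega), h, hii]
          exact Prod.Lex.right _ (by omega)
        · rcases h1 with h1 | h1
          · omega
          · rw [if_neg (by omega), h]
            exact Prod.Lex.left _ _ (by omega)
    · -- ind1 unchanged
      rw [h]
      by_cases h1' : ind1 = -1
      · rw [if_pos h1', if_pos h1']
        exact Prod.Lex.left _ _ (by omega)
      · rw [if_neg h1', if_neg h1']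
        exact Prod.Lex.right _ (by omega)


-- the measure bounds the number of remaining iterations, so the initial fuel suffices
theorem pvBridgeA (fuel : Nat) : ∀ (arr : List Int) (count ind1 ind2 i : Int)
    (hinv : 0 ≤ i ∧ ind2 = -1 ∧ (ind1 = -1 ∨ (0 ≤ ind1 ∧ ind1 ≤ i))),
    (((arr.length : Int) + 1 - (if ind1 = -1 then i else ind1)).toNat) * (arr.length + 2) +
      (((arr.length : Int) + 1 - i).toNat) ≤ fuel →
    pvLoopA arr count ind1 ind2 i fuel = pvLoopW arr count ind1 ind2 i hinv := by
  induction fuel with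
  | zero =>
    intro arr count ind1 ind2 i hinv hmu
    rw [pvLoopW, dif_neg (by omega)]
    rfl
  | succ fuel ih =>
    intro arr count ind1 ind2 i hinv hmu
    obtain ⟨hi, h2, h1⟩ := hinv
    by_cases hlt : i < (arr.length : Int)
    · rw [pvLoopW, dif_pos hlt]
      by_cases hrev : pvUpd1 arr ind1 i ≠ -1 ∧ pvUpd2 arr (pvUpd1 arr ind1 i) ind2 i ≠ -1
      · rw [show pvLoopA arr count ind1 ind2 i (fuel + 1)
            = pvLoopA (pvArrUpd arr (pvUpd1 arr ind1 i)
                (pvUpd2 arr (pvUpd1 arr ind1 i) ind2 i)) (count + 1) (-1) (-1)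
                (pvUpd1 arr ind1 i + 1) fuel from by
          rw [pvLoopA, if_pos hlt, if_pos hrev], dif_pos hrev]
        obtain ⟨hr1, hr2⟩ := hrev
        have hind2' : pvUpd2 arr (pvUpd1 arr ind1 i) ind2 i = i := by
          unfold pvUpd2 at hr2 ⊢
          split_ifs with h
          · rfl
          · rw [if_neg h] at hr2; exact absurd h2 hr2
        have hind1' : 0 ≤ pvUpd1 arr ind1 i ∧ pvUpd1 arr ind1 i ≤ i := by
          rcases pvUpd1_cases arr ind1 i with h | h <;> rcases h1 with h1 | h1 <;> omega
        have hK : (if ind1 = -1 then i else ind1) = pvUpd1 arr ind1 i := by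
          by_cases h1' : ind1 = -1
          · rw [if_pos h1']
            rcases pvUpd1_cases arr ind1 i with h | h
            · omega
            · rw [h, h1'] at hr1; exact absurd rfl hr1
          · rw [if_neg h1', pvUpd1_of_ne arr ind1 i h1']
        have hlen := pvArrUpd_length arr (pvUpd1 arr ind1 i)
          (pvUpd2 arr (pvUpd1 arr ind1 i) ind2 i) (by omega) (by omega) (by omega)
        refine ih _ _ _ _ _ ⟨by omega, rfl, Or.inl rfl⟩ ?_
        rw [hlen, if_pos rfl]
        rw [hK] at hmu
        have hc1 : (((arr.length : Int) + 1 - (pvUpd1 arr ind1 i + 1)).toNat) + 1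
            = (((arr.length : Int) + 1 - pvUpd1 arr ind1 i).toNat) := by omega
        refine Nat.lt_succ_iff.mp (lt_of_lt_of_le ?_ hmu)
        calc (((arr.length : Int) + 1 - (pvUpd1 arr ind1 i + 1)).toNat) * (arr.length + 2) +
              (((arr.length : Int) + 1 - (pvUpd1 arr ind1 i + 1)).toNat)
            ≤ (((arr.length : Int) + 1 - (pvUpd1 arr ind1 i + 1)).toNat) * (arr.length + 2) +
              (arr.length + 1) := by omega
          _ < ((((arr.length : Int) + 1 - (pvUpd1 arr ind1 i + 1)).toNat) + 1) *
              (arr.length + 2) := by rw [Nat.succ_mul]; omega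
          _ = (((arr.length : Int) + 1 - pvUpd1 arr ind1 i).toNat) * (arr.length + 2) := by
              rw [hc1]
          _ ≤ (((arr.length : Int) + 1 - pvUpd1 arr ind1 i).toNat) * (arr.length + 2) +
              (((arr.length : Int) + 1 - i).toNat) := Nat.le_add_right _ _
      · rw [show pvLoopA arr count ind1 ind2 i (fuel + 1)
            = pvLoopA arr count (pvUpd1 arr ind1 i)
                (pvUpd2 arr (pvUpd1 arr ind1 i) ind2 i) (i + 1) fuel from by
          rw [pvLoopA, if_pos hlt, if_neg hrev], dif_neg hrev]
        refine ih _ _ _ _ _ ⟨by omega, ?_, ?_⟩ ?_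
        · unfold pvUpd2
          split_ifs with h
          · exact absurd ⟨h.1, by unfold pvUpd2; rw [if_pos h]; omega⟩ hrev
          · exact h2
        · rcases pvUpd1_cases arr ind1 i with h | h <;> rcases h1 with h1 | h1 <;> omega
        · have hK' : (if ind1 = -1 then i else ind1) ≤
              (if pvUpd1 arr ind1 i = -1 then i + 1 else pvUpd1 arr ind1 i) := by
            rcases pvUpd1_cases arr ind1 i with h | h <;> rcases h1 with h1 | h1 <;>
              split_ifs <;> omega
          refine Nat.lt_succ_iff.mp (lt_of_lt_of_le ?_ hmu)
          exact Nat.add_lt_add_of_le_of_lt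
            (Nat.mul_le_mul_right _ (by omega)) (by omega)
    · rw [pvLoopW, dif_neg hlt, pvLoopA, if_neg hlt]

theorem phase2 (k : Nat) (a : List Int) (count : Int) (m i : Nat) (hk : a.length ≤ i + k)
    (hmi : m < i) :
    pvLoopW a count (m : Int) (-1) (i : Int) ⟨by omega, rfl, Or.inr ⟨by omega, by omega⟩⟩ =
      match PySem.List.index? (a.drop i) ((m : Int) + 1) with
      | none => count
      | some t =>
        pvLoopW (a.take m ++ ((a.drop m).take (i + t + 1 - m)).reverse ++ a.drop (i + t + 1))
          (count + 1) (-1) (-1) ((m : Int) + 1) ⟨by omega, rfl, Or.inl rfl⟩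
      := by
  induction k generalizing i with
  | zero =>
    rw [pvLoopW]
    rw [dif_neg (by omega)]
    have : a.drop i = [] := List.drop_eq_nil_of_le (by omega)
    simp [this, PySem.List.index?_eq_idxOf?]
  | succ k ih =>
    by_cases hi : i < a.length
    · rw [pvLoopW, dif_pos (by omega)]
      have hu1 : pvUpd1 a (m : Int) (i : Int) = (m : Int) := pvUpd1_of_ne _ _ _ (by omega)
      have hget : PySem.List.pyGetD a (i : Int) 0 = a[i] := by
        rw [PySem.List.pyGetD_natCast, List.getD_eq_getElem?_getD, List.getElem?_eq_getElem hi,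
          Option.getD_some]
      have hdrop : a.drop i = a[i] :: a.drop (i + 1) := List.drop_eq_getElem_cons hi
      by_cases hv : a[i] = (m : Int) + 1
      · have hu2 : pvUpd2 a (m : Int) (-1) (i : Int) = (i : Int) := by
          unfold pvUpd2; rw [if_pos ⟨by omega, by rw [hget, hv]⟩]
        simp only [hu1, hu2]
        rw [dif_pos ⟨by omega, by omega⟩]
        rw [hdrop, hv, PySem.List.index?_cons_self]
        show pvLoopW (pvArrUpd a (m : Int) (i : Int)) _ _ _ _ _ = _
        congr 1
        unfold pvArrUpd
        rw [pvRevList_eq, PySem.List.slice_to a (by omega : (0:Int) ≤ (m:Int)),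
          PySem.List.slice_from a (by omega : (0:Int) ≤ (i:Int) + 1),
          PySem.List.slice_toNat a (by omega) (by omega)]
        have hm' : ((m : Int)).toNat = m := by omega
        have hi' : ((i : Int) + 1).toNat = i + 1 := by omega
        simp [hm', hi']
      · have hu2 : pvUpd2 a (m : Int) (-1) (i : Int) = -1 := by
          unfold pvUpd2
          rw [if_neg (by rw [hget]; exact fun hh => hv hh.2)]
        simp only [hu1, hu2]
        rw [dif_neg (by omega)]
        have E := ih (i + 1) (by omega) (by omega)
        simp only [show ((i + 1 : Nat) : Int) = (i : Int) + 1 from by push_cast; ring] at E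
        rw [E, hdrop, PySem.List.index?_cons_of_ne _ hv]
        cases hidx : PySem.List.index? (a.drop (i + 1)) ((m : Int) + 1) with
        | none => simp
        | some t =>
          simp only [Option.map_some]
          rw [show i + (t + 1) + 1 = i + 1 + t + 1 from by omega]
    · rw [pvLoopW, dif_neg (by omega)]
      have : a.drop i = [] := List.drop_eq_nil_of_le (by omega)
      simp [this, PySem.List.index?_eq_idxOf?]

-- the common list-level model both ports reduce to: pop the front when it carries v,
-- otherwise reverse the prefix up to the first v (exclusive) after removing that v
def pvM (w : List Int) (v count : Int) : Int :=
  match hw : w with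
  | [] => count
  | x :: xs =>
    if x = v then pvM xs (v + 1) count
    else
      match hidx : PySem.List.index? (x :: xs) v with
      | none => count
      | some j => pvM ((w.take j).reverse ++ w.drop (j + 1)) (v + 1) (count + 1)
termination_by w.length
decreasing_by
  · subst hw; simp
  · subst hw
    have hj := pvIdx_lt hidx
    simp only [List.length_cons] at hj
    simp only [List.length_append, List.length_reverse, List.length_take, List.length_drop,
      List.length_cons]
    omega

-- ===== chain machinery for the B side =====

def pvSlot (n1 n2 : List Int) (x : Nat) (a b : Int) : Prop :=
  (n1.getD x 0 = a ∧ n2.getD x 0 = b) ∨ (n1.getD x 0 = b ∧ n2.getD x 0 = a)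

def pvNext (xs : List Nat) (q : Int) : Int :=
  match xs with | [] => q | y :: _ => (y : Int)

def pvLastD (p : Int) (xs : List Nat) : Int :=
  match xs with | [] => p | x :: xs => pvLastD (x : Int) xs

def pvChain (n1 n2 : List Int) (p : Int) (xs : List Nat) (q : Int) : Prop :=
  match xs with
  | [] => True
  | x :: xs => pvSlot n1 n2 x p (pvNext xs q) ∧ pvChain n1 n2 (x : Int) xs q

theorem pvSlot_symm {n1 n2 : List Int} {x : Nat} {a b : Int} (h : pvSlot n1 n2 x a b) :
    pvSlot n1 n2 x b a := by
  unfold pvSlot at *; tauto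

theorem pvOther_eq {n1 n2 : List Int} {x : Nat} {p q : Int} (h : pvSlot n1 n2 x p q) :
    pvOther n1 n2 (x : Int) p = q := by
  unfold pvOther
  rw [PySem.List.pyGetD_natCast, PySem.List.pyGetD_natCast]
  rcases h with ⟨h1, h2⟩ | ⟨h1, h2⟩
  · rw [if_pos h1, h2]
  · by_cases hpq : q = p
    · rw [hpq] at h1; rw [if_pos h1, h2, hpq]
    · rw [if_neg (by rw [h1]; exact hpq), h1]

theorem pvNext_append (as bs : List Nat) (q : Int) :
    pvNext (as ++ bs) q = pvNext as (pvNext bs q) := by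
  cases as <;> simp [pvNext]

theorem pvLastD_append (p : Int) (as bs : List Nat) :
    pvLastD p (as ++ bs) = pvLastD (pvLastD p as) bs := by
  induction as generalizing p with
  | nil => simp [pvLastD]
  | cons a as ih => simp [pvLastD, ih]

theorem pvLastD_reverse (q : Int) (xs : List Nat) : pvLastD q xs.reverse = pvNext xs q := by
  induction xs generalizing q with
  | nil => simp [pvLastD, pvNext]
  | cons x xs _ => simp [List.reverse_cons, pvLastD_append, pvLastD, pvNext]

theorem pvChain_append (n1 n2 : List Int) (p q : Int) (as bs : List Nat) :
    pvChain n1 n2 p (as ++ bs) q ↔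
      pvChain n1 n2 p as (pvNext bs q) ∧ pvChain n1 n2 (pvLastD p as) bs q := by
  induction as generalizing p with
  | nil => simp [pvChain, pvLastD]
  | cons a as ih =>
    simp only [List.cons_append, pvChain, pvLastD, pvNext_append, ih, and_assoc]

theorem pvChain_reverse {n1 n2 : List Int} {p q : Int} {xs : List Nat}
    (h : pvChain n1 n2 p xs q) : pvChain n1 n2 q xs.reverse p := by
  induction xs generalizing p with
  | nil => trivial
  | cons x xs ih =>
    obtain ⟨hs, hc⟩ := h
    rw [List.reverse_cons, pvChain_append]
    refine ⟨by simpa [pvNext] using ih hc, ?_⟩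
    rw [pvLastD_reverse]
    exact ⟨by simpa [pvNext] using pvSlot_symm hs, trivial⟩

theorem pvChain_congr {n1 n2 n1' n2' : List Int} {p q : Int} {xs : List Nat}
    (heq : ∀ y ∈ xs, n1'.getD y 0 = n1.getD y 0 ∧ n2'.getD y 0 = n2.getD y 0)
    (h : pvChain n1 n2 p xs q) : pvChain n1' n2' p xs q := by
  induction xs generalizing p with
  | nil => trivial
  | cons x xs ih =>
    obtain ⟨hs, hc⟩ := h
    refine ⟨?_, ih (fun y hy => heq y (List.mem_cons_of_mem _ hy)) hc⟩
    obtain ⟨e1, e2⟩ := heq x (List.mem_cons_self)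
    unfold pvSlot at hs ⊢
    rw [e1, e2]; exact hs

theorem pvSetD_getD_self (l : List Int) (x : Nat) (c : Int) (hx : x < l.length) :
    (PySem.List.pySetD l (x : Int) c).getD x 0 = c := by
  rw [PySem.List.pySetD_natCast]
  simp [List.getD_eq_getElem?_getD, hx]

theorem pvReplace_getD_ne (n1 n2 : List Int) (x : Nat) (a c : Int) (y : Nat) (hy : y ≠ x) :
    (pvReplace n1 n2 (x : Int) a c).1.getD y 0 = n1.getD y 0 ∧
    (pvReplace n1 n2 (x : Int) a c).2.getD y 0 = n2.getD y 0 := by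
  unfold pvReplace
  split_ifs <;>
    simp only [List.getD_eq_getElem?_getD, PySem.List.pySetD_natCast, List.getElem?_set] <;>
    constructor <;> first
      | trivial
      | (rw [if_neg (by omega : ¬ x = y)])

theorem pvReplace_length (n1 n2 : List Int) (u a c : Int) :
    (pvReplace n1 n2 u a c).1.length = n1.length ∧
    (pvReplace n1 n2 u a c).2.length = n2.length := by
  unfold pvReplace
  split_ifs <;> simp [PySem.List.length_pySetD]

theorem pvReplace_slot {n1 n2 : List Int} {x : Nat} {a b : Int} (c : Int)
    (h : pvSlot n1 n2 x a b) (hab : a ≠ b) (hx1 : x < n1.length) (hx2 : x < n2.length) :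
    pvSlot (pvReplace n1 n2 (x : Int) a c).1 (pvReplace n1 n2 (x : Int) a c).2 x c b := by
  unfold pvReplace
  rw [PySem.List.pyGetD_natCast]
  rcases h with ⟨h1, h2⟩ | ⟨h1, h2⟩
  · rw [if_pos h1]
    exact Or.inl ⟨pvSetD_getD_self _ _ _ hx1, h2⟩
  · rw [if_neg (by rw [h1]; exact fun hh => hab hh.symm)]
    exact Or.inr ⟨h1, pvSetD_getD_self _ _ _ hx2⟩


theorem pvSlot_of_eq {n1 n2 n1' n2' : List Int} {x : Nat} {a b : Int}
    (e1 : n1'.getD x 0 = n1.getD x 0) (e2 : n2'.getD x 0 = n2.getD x 0)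
    (h : pvSlot n1 n2 x a b) : pvSlot n1' n2' x a b := by
  unfold pvSlot at *; rw [e1, e2]; exact h

-- the pair of slot arrays after Source B's one or two 'replace' calls of an operation
def pvSpliced (n1 n2 : List Int) (head prev cur succ : Int) : List Int × List Int :=
  let r1 := pvReplace n1 n2 head prev succ
  if succ = -1 then r1 else pvReplace r1.1 r1.2 succ cur head

-- the splice rewires the chain to the reversed-prefix order (u removed, u the new prev)
theorem pvSplice (n1 n2 : List Int) (p : Int) (x u : Nat) (mid tail : List Nat)
    (hch : pvChain n1 n2 p (x :: (mid ++ u :: tail)) (-1))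
    (hnd : (x :: (mid ++ u :: tail)).Nodup)
    (hb1 : ∀ y ∈ x :: (mid ++ u :: tail), y < n1.length)
    (hb2 : ∀ y ∈ x :: (mid ++ u :: tail), y < n2.length)
    (hp : ∀ y ∈ x :: (mid ++ u :: tail), (y : Int) ≠ p) :
    pvChain (pvSpliced n1 n2 (x : Int) p (u : Int) (pvNext tail (-1))).1
            (pvSpliced n1 n2 (x : Int) p (u : Int) (pvNext tail (-1))).2
            (u : Int) (mid.reverse ++ x :: tail) (-1) ∧
    (pvSpliced n1 n2 (x : Int) p (u : Int) (pvNext tail (-1))).1.length = n1.length ∧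
    (pvSpliced n1 n2 (x : Int) p (u : Int) (pvNext tail (-1))).2.length = n2.length := by
  obtain ⟨S0, hch1⟩ := hch
  rw [pvNext_append] at S0
  rw [pvChain_append] at hch1
  obtain ⟨S1, S2⟩ := hch1
  simp only [show pvNext (u :: tail) (-1) = (u : Int) from rfl] at S0 S1
  obtain ⟨S3, S4⟩ := S2
  -- distinctness facts
  simp only [List.nodup_cons, List.mem_append, List.mem_cons, List.nodup_append'] at hnd
  obtain ⟨hxout, hndmid, hndut, hdisj⟩ := hnd
  have hx_mid : x ∉ mid := fun h => hxout (Or.inl h)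
  have hxu : x ≠ u := fun h => hxout (Or.inr (Or.inl h))
  have hx_tail : x ∉ tail := fun h => hxout (Or.inr (Or.inr h))
  obtain ⟨hu_tail, hndtail⟩ := hndut
  have hu_mid : u ∉ mid := fun h => (hdisj h) (List.mem_cons_self)
  -- p is none of the live nodes
  have hpx : (x : Int) ≠ p := hp x List.mem_cons_self
  have hpu : (u : Int) ≠ p := hp u (by simp)
  have hpw : p ≠ pvNext mid (u : Int) := by
    cases mid with
    | nil => exact fun h => hpu h.symm
    | cons m ms => exact fun h => (hp m (by simp)) h.symm
  -- the first replace, at node x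
  have W1' : pvSlot (pvReplace n1 n2 (x : Int) p (pvNext tail (-1))).1
      (pvReplace n1 n2 (x : Int) p (pvNext tail (-1))).2 x (pvNext tail (-1))
      (pvNext mid (u : Int)) :=
    pvReplace_slot _ S0 hpw (hb1 x List.mem_cons_self) (hb2 x List.mem_cons_self)
  have hlen1 := pvReplace_length n1 n2 (x : Int) p (pvNext tail (-1))
  cases tail with
  | nil =>
    -- succ = -1: only the first replace happens
    have hsp : pvSpliced n1 n2 (x : Int) p (u : Int) (pvNext ([] : List Nat) (-1))
        = pvReplace n1 n2 (x : Int) p (-1) := by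
      simp [pvSpliced, pvNext]
    rw [show pvNext ([] : List Nat) (-1) = -1 from rfl] at *
    rw [hsp]
    refine ⟨?_, hlen1.1, hlen1.2⟩
    rw [pvChain_append]
    constructor
    · refine pvChain_congr ?_ (pvChain_reverse S1)
      intro y hy
      exact pvReplace_getD_ne n1 n2 x p (-1) y
        (fun h => hx_mid (h ▸ (List.mem_reverse.mp hy)))
    · rw [pvLastD_reverse]
      exact ⟨pvSlot_symm W1', trivial⟩
  | cons s ts =>
    simp only [pvNext] at W1' hlen1 ⊢
    have hsne : ((s : Int)) ≠ -1 := by omega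
    have hsp : pvSpliced n1 n2 (x : Int) p (u : Int) (s : Int)
        = pvReplace (pvReplace n1 n2 (x : Int) p (s : Int)).1
            (pvReplace n1 n2 (x : Int) p (s : Int)).2 (s : Int) (u : Int) (x : Int) := by
      simp [pvSpliced, hsne]
    rw [hsp]
    have hsx : s ≠ x := fun h => hx_tail (h ▸ List.mem_cons_self)
    obtain ⟨T0, T1⟩ := S4
    have T0' : pvSlot (pvReplace n1 n2 (x : Int) p (s : Int)).1
        (pvReplace n1 n2 (x : Int) p (s : Int)).2 s (u : Int) (pvNext ts (-1)) :=
      pvSlot_of_eq (pvReplace_getD_ne n1 n2 x p (s : Int) s hsx).1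
        (pvReplace_getD_ne n1 n2 x p (s : Int) s hsx).2 T0
    have hun : (u : Int) ≠ pvNext ts (-1) := by
      cases ts with
      | nil => simp only [pvNext]; omega
      | cons t0 _ =>
        have : u ≠ t0 := fun h => hu_tail (h ▸ (by simp))
        simp only [pvNext]
        exact_mod_cast this
    have hs1 : s < (pvReplace n1 n2 (x : Int) p (s : Int)).1.length := by
      rw [hlen1.1]; exact hb1 s (by simp)
    have hs2 : s < (pvReplace n1 n2 (x : Int) p (s : Int)).2.length := by
      rw [hlen1.2]; exact hb2 s (by simp)
    have hlen2 := pvReplace_length (pvReplace n1 n2 (x : Int) p (s : Int)).1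
      (pvReplace n1 n2 (x : Int) p (s : Int)).2 (s : Int) (u : Int) (x : Int)
    have W2 := pvReplace_slot (n1 := (pvReplace n1 n2 (x : Int) p (s : Int)).1)
      (n2 := (pvReplace n1 n2 (x : Int) p (s : Int)).2) ((x : Nat) : Int) T0' hun hs1 hs2
    have W1 : pvSlot (pvReplace (pvReplace n1 n2 (x : Int) p (s : Int)).1
        (pvReplace n1 n2 (x : Int) p (s : Int)).2 (s : Int) (u : Int) (x : Int)).1
        (pvReplace (pvReplace n1 n2 (x : Int) p (s : Int)).1
          (pvReplace n1 n2 (x : Int) p (s : Int)).2 (s : Int) (u : Int) (x : Int)).2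
        x (s : Int) (pvNext mid (u : Int)) :=
      pvSlot_of_eq
        (pvReplace_getD_ne _ _ s (u : Int) (x : Int) x (fun h => hsx h.symm)).1
        (pvReplace_getD_ne _ _ s (u : Int) (x : Int) x (fun h => hsx h.symm)).2 W1'
    -- transfer of untouched reads through both writes
    have hreads : ∀ (y : Nat), y ≠ x → y ≠ s →
        (pvReplace (pvReplace n1 n2 (x : Int) p (s : Int)).1
          (pvReplace n1 n2 (x : Int) p (s : Int)).2 (s : Int) (u : Int) (x : Int)).1.getD y 0
          = n1.getD y 0 ∧
        (pvReplace (pvReplace n1 n2 (x : Int) p (s : Int)).1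
          (pvReplace n1 n2 (x : Int) p (s : Int)).2 (s : Int) (u : Int) (x : Int)).2.getD y 0
          = n2.getD y 0 := by
      intro y hyx hys
      have h1 := pvReplace_getD_ne (pvReplace n1 n2 (x : Int) p (s : Int)).1
        (pvReplace n1 n2 (x : Int) p (s : Int)).2 s (u : Int) (x : Int) y hys
      have h2 := pvReplace_getD_ne n1 n2 x p (s : Int) y hyx
      exact ⟨h1.1.trans h2.1, h1.2.trans h2.2⟩
    refine ⟨?_, hlen2.1.trans hlen1.1, hlen2.2.trans hlen1.2⟩
    rw [pvChain_append]
    constructor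
    · refine pvChain_congr ?_ (pvChain_reverse S1)
      intro y hy
      have hymem : y ∈ mid := List.mem_reverse.mp hy
      exact hreads y (fun h => hx_mid (h ▸ hymem))
        (fun h => (hdisj hymem) (h ▸ (by simp)))
    · rw [pvLastD_reverse]
      refine ⟨pvSlot_symm W1, W2, ?_⟩
      rw [List.nodup_cons] at hndtail
      refine pvChain_congr ?_ T1
      intro y hy
      exact hreads y (fun h => hx_tail (h ▸ List.mem_cons_of_mem _ hy))
        (fun h => hndtail.1 (h ▸ hy))

-- the inner walk finds the first chain node carrying v, with its predecessor
theorem pvWalk_found (arr n1 n2 : List Int) (v : Int) :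
    ∀ (xs : List Nat) (p : Int) (fuel : Nat), xs.length < fuel →
    pvChain n1 n2 p xs (-1) →
    pvWalk arr n1 n2 v p (pvNext xs (-1)) fuel =
      (match PySem.List.index? (xs.map (fun y => arr.getD y 0)) v with
       | none => (pvLastD p xs, -1)
       | some j => (pvLastD p (xs.take j), ((xs.getD j 0 : Nat) : Int))) := by
  intro xs
  induction xs with
  | nil =>
    intro p fuel hf _
    obtain ⟨fuel, rfl⟩ : ∃ f, fuel = f + 1 := ⟨fuel - 1, by omega⟩
    rw [pvWalk, if_neg (by simp [pvNext])]
    simp [PySem.List.index?_eq_idxOf?, pvLastD, pvNext]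
  | cons x xs ih =>
    intro p fuel hf hch
    obtain ⟨fuel, rfl⟩ : ∃ f, fuel = f + 1 := ⟨fuel - 1, by omega⟩
    obtain ⟨hs, hc⟩ := hch
    have hgx : PySem.List.pyGetD arr ((x : Nat) : Int) 0 = arr.getD x 0 :=
      PySem.List.pyGetD_natCast ..
    by_cases hxv : arr.getD x 0 = v
    · rw [pvWalk, show pvNext (x :: xs) (-1) = (x : Int) from rfl,
        if_neg (by rw [hgx, hxv]; simp)]
      rw [List.map_cons, hxv, PySem.List.index?_cons_self]
      simp [pvLastD]
    · rw [pvWalk, show pvNext (x :: xs) (-1) = (x : Int) from rfl,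
        if_pos ⟨by omega, by rw [hgx]; exact hxv⟩]
      rw [pvOther_eq hs]
      rw [ih (x : Int) fuel (by simpa using hf) hc]
      rw [List.map_cons, PySem.List.index?_cons_of_ne _ hxv]
      cases hidx : PySem.List.index? (xs.map (fun y => arr.getD y 0)) v with
      | none => simp [pvLastD]
      | some j => simp [pvLastD, List.take_succ_cons]


theorem pvM_nil (v count : Int) : pvM [] v count = count := by rw [pvM]

theorem pvM_cons (x : Int) (xs : List Int) (v count : Int) : pvM (x :: xs) v count =
    (if x = v then pvM xs (v + 1) count
     else match PySem.List.index? (x :: xs) v with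
       | none => count
       | some j =>
         pvM (((x :: xs).take j).reverse ++ (x :: xs).drop (j + 1)) (v + 1) (count + 1)) := by
  rw [pvM]
  by_cases hxv : x = v
  · rw [if_pos hxv, if_pos hxv]
  · rw [if_neg hxv, if_neg hxv]
    cases h : PySem.List.index? (x :: xs) v <;> rfl

-- one unfolding of the outer loop in its operation branch, with the walk result substituted
theorem pvLoopC_op (arr n1 n2 : List Int) (head prev v count : Int) (fuel : Nat)
    (pred cur : Int) (hhead : ¬ head = -1) (hne : ¬ PySem.List.pyGetD arr head 0 = v)
    (hw : pvWalk arr n1 n2 v prev head (arr.length + 1) = (pred, cur)) :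
    pvLoopC arr n1 n2 head prev v count (fuel + 1) =
      if cur = -1 then count
      else
        pvLoopC arr (pvSpliced n1 n2 head prev cur (pvOther n1 n2 cur pred)).1
          (pvSpliced n1 n2 head prev cur (pvOther n1 n2 cur pred)).2
          pred cur (v + 1) (count + 1) fuel := by
  rw [pvLoopC, if_neg hhead, if_neg hne, hw]
  rfl

-- the linked-chain loop computes the list-level model pvM on the carried values
theorem pvSim (arr : List Int) : ∀ (fuel : Nat) (n1 n2 : List Int) (rem : List Nat)
    (p v count : Int),
    rem.length < fuel → rem.length ≤ arr.length →
    pvChain n1 n2 p rem (-1) → rem.Nodup →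
    (∀ y ∈ rem, y < n1.length) → (∀ y ∈ rem, y < n2.length) →
    (∀ y ∈ rem, (y : Int) ≠ p) →
    pvLoopC arr n1 n2 (pvNext rem (-1)) p v count fuel
      = pvM (rem.map (fun y => arr.getD y 0)) v count := by
  intro fuel
  induction fuel with
  | zero => intro _ _ rem _ _ _ hf; omega
  | succ fuel ih =>
    intro n1 n2 rem p v count hf ha hch hnd hb1 hb2 hp
    cases rem with
    | nil =>
      rw [pvLoopC, show pvNext ([] : List Nat) (-1) = -1 from rfl, if_pos rfl]
      rw [List.map_nil, pvM_nil]
    | cons x xs =>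
      have hgx : PySem.List.pyGetD arr ((x : Nat) : Int) 0 = arr.getD x 0 :=
        PySem.List.pyGetD_natCast ..
      obtain ⟨hs0, hch1⟩ := hch
      rw [List.nodup_cons] at hnd
      obtain ⟨hxout, hndxs⟩ := hnd
      rw [show pvNext (x :: xs) (-1) = (x : Int) from rfl]
      by_cases hxv : arr.getD x 0 = v
      · rw [pvLoopC, if_neg (by omega), if_pos (by rw [hgx, hxv]), pvOther_eq hs0]
        rw [ih n1 n2 xs (x : Int) (v + 1) count (by simpa using hf)
          (by simp at ha ⊢; omega) hch1 hndxs
          (fun y hy => hb1 y (List.mem_cons_of_mem _ hy))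
          (fun y hy => hb2 y (List.mem_cons_of_mem _ hy))
          (fun y hy h => hxout ((Nat.cast_injective h : y = x) ▸ hy))]
        rw [List.map_cons, pvM_cons, if_pos hxv]
      · have hwalk := pvWalk_found arr n1 n2 v (x :: xs) p (arr.length + 1)
          (by simp at ha ⊢; omega) ⟨hs0, hch1⟩
        rw [show pvNext (x :: xs) (-1) = (x : Int) from rfl] at hwalk
        rw [List.map_cons, PySem.List.index?_cons_of_ne _ hxv] at hwalk
        cases hidx : PySem.List.index? (xs.map (fun y => arr.getD y 0)) v with
        | none =>
          rw [hidx] at hwalk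
          have hw : pvWalk arr n1 n2 v p ((x : Nat) : Int) (arr.length + 1)
              = (pvLastD p (x :: xs), -1) := hwalk
          rw [pvLoopC_op arr n1 n2 ((x : Nat) : Int) p v count fuel _ _ (by omega)
            (by rw [hgx]; exact hxv) hw, if_pos rfl]
          rw [List.map_cons, pvM_cons, if_neg hxv,
            PySem.List.index?_cons_of_ne _ hxv, hidx]
          rfl
        | some jj =>
          rw [hidx] at hwalk
          have hjlt : jj < xs.length := by
            have := pvIdx_lt hidx; simpa using this
          have hxs : xs = xs.take jj ++ xs[jj] :: xs.drop (jj + 1) := by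
            conv_lhs => rw [← List.take_append_drop jj xs]
            rw [List.drop_eq_getElem_cons hjlt]
          set mid := xs.take jj with hmid
          set u := xs[jj] with hu
          set tail := xs.drop (jj + 1) with htail
          have hcur : (((x :: xs).getD (jj + 1) 0 : Nat) : Int) = (u : Int) := by
            simp [List.getD_eq_getElem?_getD, List.getElem?_eq_getElem hjlt, hu]
          have hpred : pvLastD p ((x :: xs).take (jj + 1)) = pvLastD (x : Int) mid := by
            rw [List.take_succ_cons, pvLastD]
          have hw : pvWalk arr n1 n2 v p ((x : Nat) : Int) (arr.length + 1)
              = (pvLastD (x : Int) mid, (u : Int)) := by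
            rw [hwalk]
            show (pvLastD p ((x :: xs).take (jj + 1)), (((x :: xs).getD (jj + 1) 0 : Nat) : Int))
              = _
            rw [hcur, hpred]
          rw [pvLoopC_op arr n1 n2 ((x : Nat) : Int) p v count fuel _ _ (by omega)
            (by rw [hgx]; exact hxv) hw, if_neg (by omega)]
          -- the full live list in decomposed form
          have hrem : (x :: xs) = x :: (mid ++ u :: tail) := by rw [← hxs]
          have hch' : pvChain n1 n2 p (x :: (mid ++ u :: tail)) (-1) := by
            rw [← hrem]; exact ⟨hs0, hch1⟩
          have hnd' : (x :: (mid ++ u :: tail)).Nodup := by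
            rw [← hrem]; exact List.nodup_cons.mpr ⟨hxout, hndxs⟩
          have hb1' : ∀ y ∈ x :: (mid ++ u :: tail), y < n1.length := by
            rw [← hrem]; exact hb1
          have hb2' : ∀ y ∈ x :: (mid ++ u :: tail), y < n2.length := by
            rw [← hrem]; exact hb2
          have hp' : ∀ y ∈ x :: (mid ++ u :: tail), (y : Int) ≠ p := by
            rw [← hrem]; exact hp
          have hS3 : pvSlot n1 n2 u (pvLastD (x : Int) mid) (pvNext tail (-1)) := by
            have h2 := hch'.2
            rw [pvChain_append] at h2
            exact h2.2.1
          rw [pvOther_eq hS3]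
          obtain ⟨hchain', hlen1', hlen2'⟩ :=
            pvSplice n1 n2 p x u mid tail hch' hnd' hb1' hb2' hp'
          have hhead : pvLastD (x : Int) mid = pvNext (mid.reverse ++ x :: tail) (-1) := by
            rw [pvNext_append, show pvNext (x :: tail) (-1) = (x : Int) from rfl]
            have h3 := pvLastD_reverse (x : Int) mid.reverse
            rw [List.reverse_reverse] at h3
            exact h3
          have hndrem' : (mid.reverse ++ x :: tail).Nodup := by
            have h1 : (x :: (mid ++ tail)).Perm (mid.reverse ++ x :: tail) :=
              List.perm_middle.symm.trans (mid.reverse_perm.symm.append_right _)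
            refine h1.nodup ?_
            have h2 : (x :: (mid ++ tail)).Sublist (x :: (mid ++ u :: tail)) := by
              refine List.Sublist.cons₂ x (List.Sublist.append_left ?_ mid)
              exact List.sublist_cons_self u tail
            exact h2.nodup hnd'
          have hmem' : ∀ y ∈ mid.reverse ++ x :: tail, y ∈ x :: (mid ++ u :: tail) := by
            intro y hy
            simp only [List.mem_append, List.mem_reverse, List.mem_cons] at hy ⊢
            tauto
          have humem : u ∉ mid.reverse ++ x :: tail := by
            simp only [List.nodup_cons, List.mem_append, List.mem_cons,
              List.nodup_append'] at hnd'
            obtain ⟨hxo, _, hnut, hdis⟩ := hnd'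
            simp only [List.mem_append, List.mem_reverse, List.mem_cons]
            rintro (h | h | h)
            · exact (hdis h) List.mem_cons_self
            · exact hxo (Or.inr (Or.inl h.symm))
            · exact hnut.1 h
          have hlenrem' : (mid.reverse ++ x :: tail).length = xs.length := by
            conv_rhs => rw [hxs]
            simp
          rw [hhead]
          rw [ih _ _ (mid.reverse ++ x :: tail) (u : Int) (v + 1) (count + 1)
            (by rw [hlenrem']; simp at hf; omega)
            (by rw [hlenrem']; simp at ha; omega)
            hchain' hndrem'
            (fun y hy => by rw [hlen1']; exact hb1' y (hmem' y hy))
            (fun y hy => by rw [hlen2']; exact hb2' y (hmem' y hy))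
            (fun y hy h => humem ((Nat.cast_injective h : y = u) ▸ hy))]
          -- pvM side
          rw [List.map_cons, pvM_cons, if_neg hxv,
            PySem.List.index?_cons_of_ne _ hxv, hidx]
          show _ = pvM (((arr.getD x 0 :: xs.map fun y => arr.getD y 0).take (jj + 1)).reverse
            ++ (arr.getD x 0 :: xs.map fun y => arr.getD y 0).drop (jj + 1 + 1)) (v + 1)
            (count + 1)
          congr 1
          rw [show ((arr.getD x 0 :: xs.map fun y => arr.getD y 0))
              = (x :: xs).map (fun y => arr.getD y 0) from rfl]
          rw [← List.map_take, ← List.map_drop, ← List.map_reverse, ← List.map_append]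
          congr 1
          rw [List.take_succ_cons, List.reverse_cons, List.drop_succ_cons, ← hmid, ← htail,
            List.append_assoc, List.singleton_append]

-- A's loop, at the start of a fresh scan, computes pvM on the unfixed suffix
theorem pvPhaseM : ∀ (N : Nat) (w P : List Int) (count : Int), w.length ≤ N →
    pvLoopW (P ++ w) count (-1) (-1) ((P.length : Nat) : Int)
      ⟨by omega, rfl, Or.inl rfl⟩ = pvM w (((P.length : Nat) : Int) + 1) count := by
  intro N
  induction N with
  | zero =>
    intro w P count hN
    have hw : w = [] := List.length_eq_zero_iff.mp (by omega)
    subst hw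
    rw [pvLoopW, dif_neg (by simp), pvM_nil]
  | succ N ih =>
    intro w P count hN
    cases w with
    | nil =>
      rw [pvLoopW, dif_neg (by simp)]
      try rw [pvM_nil]
    | cons x xs =>
      have hlen : ((P.length : Nat) : Int) < ((P ++ x :: xs).length : Int) := by
        have h : P.length < (P ++ x :: xs).length := by simp
        exact_mod_cast h
      rw [pvLoopW, dif_pos hlen]
      have hget : PySem.List.pyGetD (P ++ x :: xs) ((P.length : Nat) : Int) 0 = x := by
        rw [PySem.List.pyGetD_natCast, List.getD_eq_getElem?_getD,
          List.getElem?_append_right (le_refl P.length)]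
        simp
      by_cases hxv : x = ((P.length : Nat) : Int) + 1
      · have hu1 : pvUpd1 (P ++ x :: xs) (-1) ((P.length : Nat) : Int) = -1 := by
          unfold pvUpd1
          rw [if_neg (fun hh => hh.2 (by rw [hget, hxv]))]
        have hu2 : pvUpd2 (P ++ x :: xs) (-1) (-1) ((P.length : Nat) : Int) = -1 := by
          unfold pvUpd2; rw [if_neg (fun hh => hh.1 rfl)]
        simp only [hu1, hu2]
        rw [dif_neg (by omega)]
        have E := ih xs (P ++ [x]) count (by simpa using hN)
        simp only [List.length_append, List.length_cons, List.length_nil] at E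
        simp only [show ((P.length + 1 : Nat) : Int) = ((P.length : Nat) : Int) + 1 from by
          push_cast; ring, List.append_assoc, List.singleton_append] at E
        rw [E, pvM_cons, if_pos hxv]
      · have hu1 : pvUpd1 (P ++ x :: xs) (-1) ((P.length : Nat) : Int)
            = ((P.length : Nat) : Int) := by
          unfold pvUpd1
          rw [if_pos ⟨rfl, by rw [hget]; exact hxv⟩]
        have hu2 : pvUpd2 (P ++ x :: xs) ((P.length : Nat) : Int) (-1)
            ((P.length : Nat) : Int) = -1 := by
          unfold pvUpd2
          rw [if_neg (by rw [hget]; exact fun hh => hxv hh.2)]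
        simp only [hu1, hu2]
        rw [dif_neg (by omega)]
        have P2 := phase2 N (P ++ x :: xs) count P.length (P.length + 1)
          (by have := hN; simp at this ⊢; omega) (by omega)
        simp only [show ((P.length + 1 : Nat) : Int) = ((P.length : Nat) : Int) + 1 from by
          push_cast; ring] at P2
        rw [P2]
        have hdropi : (P ++ x :: xs).drop (P.length + 1) = xs := by
          rw [List.drop_length_add_append]
          simp
        rw [hdropi, pvM_cons, if_neg hxv, PySem.List.index?_cons_of_ne _ hxv]
        cases hidx : PySem.List.index? xs (((P.length : Nat) : Int) + 1) with
        | none => rfl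
        | some t =>
          show pvLoopW _ _ _ _ _ _ = _
          have ht : t < xs.length := pvIdx_lt hidx
          have hxst : xs[t] = ((P.length : Nat) : Int) + 1 :=
            (PySem.List.getElem_of_index?_eq_some hidx).2.1
          -- rewrite the rebuilt array as (P ++ [v]) ++ w'
          have htake : (P ++ x :: xs).take P.length = P := List.take_left
          have hdropm : (P ++ x :: xs).drop P.length = x :: xs := List.drop_left
          have hTT : P.length + 1 + t + 1 - P.length = t + 2 := by omega
          have hdrop2 : (P ++ x :: xs).drop (P.length + 1 + t + 1) = xs.drop (t + 1) := by
            rw [show P.length + 1 + t + 1 = P.length + (t + 2) from by omega,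
              List.drop_length_add_append, List.drop_succ_cons]
          have htk : (x :: xs).take (t + 2) = x :: (xs.take t ++ [xs[t]]) := by
            rw [List.take_succ_cons, List.take_succ_eq_append_getElem ht]
          have harr : (P ++ x :: xs).take P.length
                ++ (((P ++ x :: xs).drop P.length).take (P.length + 1 + t + 1 - P.length)).reverse
                ++ (P ++ x :: xs).drop (P.length + 1 + t + 1)
              = (P ++ [((P.length : Nat) : Int) + 1])
                ++ ((xs.take t).reverse ++ x :: xs.drop (t + 1)) := by
            rw [htake, hdropm, hTT, hdrop2, htk]
            rw [List.reverse_cons, List.reverse_append, List.reverse_singleton, hxst]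
            simp
          rw [harr]
          have E := ih ((xs.take t).reverse ++ x :: xs.drop (t + 1))
            (P ++ [((P.length : Nat) : Int) + 1]) (count + 1) (by simp at hN ⊢; omega)
          simp only [List.length_append, List.length_cons, List.length_nil] at E
          simp only [show ((P.length + 1 : Nat) : Int) = ((P.length : Nat) : Int) + 1 from by
            push_cast; ring] at E
          rw [E]
          show _ = pvM (((x :: xs).take (t + 1)).reverse ++ (x :: xs).drop (t + 1 + 1))
            (((P.length : Nat) : Int) + 1 + 1) (count + 1)
          rw [List.take_succ_cons, List.reverse_cons, List.drop_succ_cons,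
            List.append_assoc, List.singleton_append]

-- the initial slot arrays of B encode the chain 0,1,…,n-1
theorem pvInitChain (n : Nat) : ∀ (m k : Nat), k + m = n →
    pvChain ((List.range n).map (fun k : Nat => (k : Int) - 1))
            ((List.range n).map (fun k => if k + 1 < n then (k : Int) + 1 else -1))
            (((k : Nat) : Int) - 1) (List.range' k m) (-1) := by
  intro m
  induction m with
  | zero => intro k _; trivial
  | succ m ih =>
    intro k hk
    have hkn : k < n := by omega
    have hg1 : ((List.range n).map (fun k : Nat => (k : Int) - 1)).getD k 0 = (k : Int) - 1 := by
      rw [List.getD_eq_getElem?_getD, List.getElem?_map, List.getElem?_range hkn]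
      rfl
    have hg2 : ((List.range n).map (fun k => if k + 1 < n then (k : Int) + 1 else -1)).getD k 0
        = if k + 1 < n then (k : Int) + 1 else -1 := by
      rw [List.getD_eq_getElem?_getD, List.getElem?_map, List.getElem?_range hkn]
      rfl
    refine ⟨Or.inl ⟨hg1, ?_⟩, ?_⟩
    · rw [hg2]
      cases m with
      | zero =>
        rw [if_neg (by omega)]
        rfl
      | succ m =>
        rw [if_pos (by omega)]
        rw [show List.range' (k + 1) (m + 1) = (k + 1) :: List.range' (k + 2) m from rfl]
        simp [pvNext]
    · have := ih (k + 1) (by omega)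
      simp only [show (((k + 1 : Nat)) : Int) - 1 = (k : Int) from by push_cast; ring] at this
      exact this

-- ===== VERDICT (by name: the statement is the Claim_ definition above) =====
theorem minOperations2_spec : Claim_equal_minOperations2 := by
  intro arr _
  unfold Spec_minOperations2 minOperations2 minOperations2_alt
  -- A side: loop = pvLoopW = pvM arr 1 0
  rw [pvBridgeA _ arr 0 (-1) (-1) 0 ⟨le_refl 0, rfl, Or.inl rfl⟩ (by
    have h1 : (((arr.length : Int) + 1 - (if (-1 : Int) = -1 then 0 else -1)).toNat)
        = arr.length + 1 := by rw [if_pos rfl]; omega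
    have h2 : (((arr.length : Int) + 1 - 0).toNat) = arr.length + 1 := by omega
    rw [h1, h2, show (arr.length + 1) * (arr.length + 3)
      = (arr.length + 1) * (arr.length + 2) + (arr.length + 1) from by ring])]
  have hA := pvPhaseM arr.length arr [] 0 (le_refl _)
  simp only [List.nil_append, List.length_nil, Nat.cast_zero, zero_add] at hA
  rw [hA]
  -- B side: linked-chain loop = pvM arr 1 0
  have hmap : (List.range arr.length).map (fun y => arr.getD y 0) = arr := by
    refine List.ext_getElem (by simp) ?_
    intro i h1 h2
    simp [List.getD_eq_getElem?_getD, List.getElem?_eq_getElem h2]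
  have hch0 : pvChain ((List.range arr.length).map (fun k : Nat => (k : Int) - 1))
      ((List.range arr.length).map (fun k => if k + 1 < arr.length then (k : Int) + 1 else -1))
      (-1) (List.range arr.length) (-1) := by
    have h := pvInitChain arr.length arr.length 0 (by omega)
    simp only [Nat.cast_zero, zero_sub] at h
    rw [← List.range_eq_range'] at h
    exact h
  have hhead : (if arr.length ≠ 0 then (0 : Int) else -1)
      = pvNext (List.range arr.length) (-1) := by
    cases hn : arr.length with
    | zero => rfl
    | succ m =>
      rw [if_pos (by omega), List.range_eq_range',
        show List.range' 0 (m + 1) = 0 :: List.range' 1 m from rfl]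
      rfl
  have hB := pvSim arr (arr.length + 1)
    ((List.range arr.length).map (fun k : Nat => (k : Int) - 1))
    ((List.range arr.length).map (fun k => if k + 1 < arr.length then (k : Int) + 1 else -1))
    (List.range arr.length) (-1) 1 0 (by simp) (by simp) hch0 (List.nodup_range)
    (by intro y hy; simp at hy ⊢; omega) (by intro y hy; simp at hy ⊢; omega)
    (by intro y _; omega)
  rw [hmap] at hB
  rw [hhead, hB]
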